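-- pv_equiv track=rewrite | github.com/marco906/SwiftUISample | SwiftUISample/Scripts/strings.py | generate_swift_class
-- ===== SOURCE A (Python) =====
-- def generate_swift_class(strings):
--     swift_code = "//\n//  This file is auto generated from the strings catalog by strings.py\n//\n\n"
--     swift_code += "import Foundation\n"
--     swift_code += "import SwiftUI\n\n"
--     swift_code += "struct Strings {\n\n"
--
--     for key, value in strings.items():
--         if value == None:
--             continue
--         args = []
--
--         words = key.split()
--         key_name = words[0] + ''.join(word.title() for word in words[1:])
--
--         # Find parameters in the value
--         start = value.find("%lld")
--         arg_index = 0
--         while start != -1: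
--             arg_index += 1
--             end = start + 4
--             arg_name = f"arg{arg_index}"
--             args.append(arg_name)
--             value = value[:start] + "\\(" + arg_name + ")" + value[end:]
--             start = value.find("%lld")
--
--         # Generate static property or static method based on parameters
--         if len(args) > 0:
--             swift_code += f"    static func {key}("
--             swift_code += ', '.join(f"{arg}: String" for arg in args)
--             swift_code += f") -> LocalizedStringResource {{ LocalizedStringResource(\"{key}\", defaultValue: \"{value}\") }}\n\n"
--         else:
--             swift_code += f"    static let {key_name}: LocalizedStringKey = \"{key}\"\n\n"
--
--     swift_code += "}\n"
--
--     return swift_code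
-- ===== SOURCE B (Python) =====
-- def generate_swift_class(strings):
--     header = ("//\n//  This file is auto generated from the strings catalog by strings.py\n//\n\n"
--               "import Foundation\n"
--               "import SwiftUI\n\n"
--               "struct Strings {\n\n")
--     body = []
--     for key, value in strings.items():
--         if value is None:
--             continue
--         # One split does the work of A's find/splice loop.
--         parts = value.split("%lld")
--         n = len(parts) - 1
--         if n > 0:
--             args = [f"arg{i}" for i in range(1, n + 1)]
--             rebuilt = parts[0] + "".join(f"\\({a})" + p for a, p in zip(args, parts[1:]))
--             params = ", ".join(f"{a}: String" for a in args)
--             body.append(f"    static func {key}({params}) -> LocalizedStringResource "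
--                         f"{{ LocalizedStringResource(\"{key}\", defaultValue: \"{rebuilt}\") }}\n\n")
--         else:
--             words = key.split()
--             key_name = words[0] + "".join(w.title() for w in words[1:])
--             body.append(f"    static let {key_name}: LocalizedStringKey = \"{key}\"\n\n")
--     return header + "".join(body) + "}\n"
-- ===== Notes on version B (the rewrite author's own statement) =====
-- stated objective: idiomatic
-- what changed: A's mutating while-loop over the value (find '%lld', slice-splice, rebuild, re-scan) is replaced by a single split on '%lld' with the argument names derived from the part count and one left-to-right reconstruction; the output is assembled by collecting per-entry strings and joining them instead of concatenating onto one accumulator string.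
import Mathlib
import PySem

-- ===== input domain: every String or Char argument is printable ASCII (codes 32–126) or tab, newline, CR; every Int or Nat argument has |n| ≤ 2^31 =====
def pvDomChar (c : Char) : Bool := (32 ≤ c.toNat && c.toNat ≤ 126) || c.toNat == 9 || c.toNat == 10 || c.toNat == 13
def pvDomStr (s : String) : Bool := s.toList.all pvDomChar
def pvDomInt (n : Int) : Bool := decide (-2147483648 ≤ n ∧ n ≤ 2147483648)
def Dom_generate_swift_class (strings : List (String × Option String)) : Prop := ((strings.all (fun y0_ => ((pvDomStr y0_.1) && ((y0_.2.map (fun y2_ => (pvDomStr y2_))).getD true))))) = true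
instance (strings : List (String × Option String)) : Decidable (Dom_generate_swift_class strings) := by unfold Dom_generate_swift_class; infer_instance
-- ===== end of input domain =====

-- B replaces A's find/splice/re-scan while-loop over the value by one split on "%lld"
-- plus a single left-to-right reconstruction (idiomatic); the surrounding formatting is unchanged.

-- ===== PORT A =====
-- All string operations are ported over the code-point list (String.toList); exact on the ASCII domain.
def pvSep : List Char := ['%', 'l', 'l', 'd']

-- port of str.title() (exact on ASCII): fold carrying "previous char was alphabetic"
def pvTitleA (w : List Char) : List Char :=
  (w.foldl (fun (acc : List Char × Bool) c =>
      if PySem.Chars.isalpha c then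
        (acc.1 ++ [if acc.2 then PySem.Chars.lowerChar c else PySem.Chars.upperChar c], true)
      else (acc.1 ++ [c], false)) (([] : List Char), false)).1

def pvKeyNameA (key : List Char) : List Char :=
  match PySem.Chars.split₀ key with
  | [] => []          -- Python raises IndexError here (words[0]); excluded by Pre_
  | w :: ws => w ++ PySem.Chars.join [] (ws.map pvTitleA)

-- A's while-loop; fuel = length of the original value (an upper bound on the number of
-- "%lld" occurrences, proved sufficient below) makes the recursion structural
def pvLoopA : Nat → List Char → Int → List (List Char) → List (List Char) × List Char
  | 0, value, _, args => (args, value)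
  | fuel+1, value, argIndex, args =>
    let start := PySem.Chars.find value pvSep
    if start = -1 then (args, value)
    else
      let argIndex' := argIndex + 1
      let argName := ['a', 'r', 'g'] ++ PySem.Int.toChars argIndex'
      let value' := PySem.Chars.slice value none (some start) ++ ['\\', '('] ++ argName ++ [')'] ++
        PySem.Chars.slice value (some (start + 4)) none
      pvLoopA fuel value' argIndex' (args ++ [argName])

def pvEntryA (key value : List Char) : List Char :=
  let keyName := pvKeyNameA key
  let r := pvLoopA value.length value 0 []
  if r.1.length > 0 then
    "    static func ".toList ++ key ++ ['('] ++
      PySem.Chars.join (", ".toList) (r.1.map (fun a => a ++ ": String".toList)) ++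
      ") -> LocalizedStringResource { LocalizedStringResource(\"".toList ++ key ++
      "\", defaultValue: \"".toList ++ r.2 ++ "\") }\n\n".toList
  else
    "    static let ".toList ++ keyName ++ ": LocalizedStringKey = \"".toList ++ key ++ "\"\n\n".toList

def generate_swift_class (strings : List (String × Option String)) : String :=
  String.ofList
    ("//\n//  This file is auto generated from the strings catalog by strings.py\n//\n\nimport Foundation\nimport SwiftUI\n\nstruct Strings {\n\n".toList ++
     strings.foldl (fun acc kv =>
        match kv.2 with
        | none => acc
        | some v => acc ++ pvEntryA kv.1.toList v.toList) [] ++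
     "}\n".toList)

-- ===== PORT B =====
-- port of str.title() (exact on ASCII): direct recursion with the "previous was alphabetic" flag
def pvTitleB : Bool → List Char → List Char
  | _, [] => []
  | prev, c :: cs =>
    if PySem.Chars.isalpha c then
      (if prev then PySem.Chars.lowerChar c else PySem.Chars.upperChar c) :: pvTitleB true cs
    else c :: pvTitleB false cs

def pvKeyNameB (key : List Char) : List Char :=
  match PySem.Chars.split₀ key with
  | [] => []          -- Python raises IndexError here (words[0]); excluded by Pre_
  | w :: ws => w ++ PySem.Chars.join [] (ws.map (pvTitleB false))

def pvEntryB (key value : List Char) : List Char :=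
  let parts := PySem.Chars.splitOn value ("%lld".toList)
  let n := parts.length - 1
  if 0 < n then
    let args := (PySem.List.pyRange 1 ((n : Int) + 1) 1).map (fun j => ['a', 'r', 'g'] ++ PySem.Int.toChars j)
    let rebuilt := parts.headD [] ++
      PySem.Chars.join [] ((args.zip parts.tail).map (fun ap => ['\\', '('] ++ ap.1 ++ [')'] ++ ap.2))
    let params := PySem.Chars.join (", ".toList) (args.map (fun a => a ++ ": String".toList))
    "    static func ".toList ++ key ++ ['('] ++ params ++
      ") -> LocalizedStringResource { LocalizedStringResource(\"".toList ++ key ++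
      "\", defaultValue: \"".toList ++ rebuilt ++ "\") }\n\n".toList
  else
    "    static let ".toList ++ pvKeyNameB key ++ ": LocalizedStringKey = \"".toList ++ key ++ "\"\n\n".toList

def generate_swift_class_alt (strings : List (String × Option String)) : String :=
  let body := strings.foldl (fun (acc : List (List Char)) kv =>
      match kv.2 with
      | none => acc
      | some v => acc ++ [pvEntryB kv.1.toList v.toList]) []
  String.ofList
    ("//\n//  This file is auto generated from the strings catalog by strings.py\n//\n\nimport Foundation\nimport SwiftUI\n\nstruct Strings {\n\n".toList ++
     PySem.Chars.join [] body ++ "}\n".toList)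

-- ===== PRECONDITION & SPEC =====
-- Pre_ excludes exactly the inputs on which Python A raises IndexError: an entry whose
-- value is not None but whose key splits into no words (empty or whitespace-only key).
def Pre_generate_swift_class (strings : List (String × Option String)) : Prop :=
  ∀ kv ∈ strings, kv.2 ≠ none → PySem.Chars.split₀ kv.1.toList ≠ []
instance (strings : List (String × Option String)) : Decidable (Pre_generate_swift_class strings) := by
  unfold Pre_generate_swift_class; infer_instance

def pvWitness_generate_swift_class : (List (String × Option String)) :=
  [("hello world", some "Hi"), ("count", some "you have %lld of %lld"), ("skip", none)]

def Spec_generate_swift_class (strings : List (String × Option String)) (out : String) : Prop := out = generate_swift_class_alt strings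
instance (strings : List (String × Option String)) (out : String) : Decidable (Spec_generate_swift_class strings out) := by unfold Spec_generate_swift_class; infer_instance

-- ===== CLAIM (what is proved, stated in full; the proofs are below) =====
def Claim_equal_generate_swift_class : Prop := ∀ (strings : List (String × Option String)), Dom_generate_swift_class strings → Pre_generate_swift_class strings → Spec_generate_swift_class strings (generate_swift_class strings)

-- ===== LEMMAS AND PROOFS =====

theorem pvWitness_ok : Dom_generate_swift_class pvWitness_generate_swift_class ∧
    Pre_generate_swift_class pvWitness_generate_swift_class := by
  constructor <;> decide

-- ---------- generic list helpers ----------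

theorem pvPrefix_iff {α : Type} (sub t : List α) :
    sub <+: t ↔ ∀ (j : Nat) (hj : j < sub.length), t[j]? = some (sub[j]'hj) := by
  constructor
  · intro h j hj
    have hl : j < t.length := lt_of_lt_of_le hj h.length_le
    rw [List.getElem?_eq_getElem hl]
    exact congrArg some (h.getElem hj).symm
  · induction sub generalizing t with
    | nil => intro _; exact List.nil_prefix
    | cons a as ih =>
      intro h
      cases t with
      | nil => have := h 0 (by simp); simp at this
      | cons b bs =>
        have h0 := h 0 (by simp)
        simp at h0
        exact List.cons_prefix_cons.mpr ⟨h0.symm, ih bs (fun j hj => by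
          have := h (j+1) (by simpa using Nat.succ_lt_succ hj)
          simpa using this)⟩

theorem pvDropGet {α : Type} (t : List α) (p j : Nat) : (t.drop p)[j]? = t[p + j]? := by
  rw [List.getElem?_drop]

theorem pvTakeGet {α : Type} (t : List α) (k j : Nat) (h : j < k) : (t.take k)[j]? = t[j]? := by
  induction t generalizing k j with
  | nil => simp
  | cons a as ih =>
    cases k with
    | zero => omega
    | succ k =>
      cases j with
      | zero => simp
      | succ j => simpa using ih k j (by omega)

theorem pvDropAppend {α : Type} (pre rest : List α) (k : Nat) :
    (pre ++ rest).drop (pre.length + k) = rest.drop k := by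
  apply List.ext_getElem?
  intro j
  rw [pvDropGet, pvDropGet, Nat.add_assoc, List.getElem?_append_right (by omega)]
  congr 1
  omega

theorem pvTakeAppend {α : Type} (pre rest : List α) (k : Nat) :
    (pre ++ rest).take (pre.length + k) = pre ++ rest.take k := by
  apply List.ext_getElem?
  intro j
  by_cases h1 : j < pre.length
  · rw [pvTakeGet _ _ _ (by omega), List.getElem?_append_left h1, List.getElem?_append_left h1]
  · by_cases h2 : j < pre.length + k
    · rw [pvTakeGet _ _ _ h2, List.getElem?_append_right (by omega),
        List.getElem?_append_right (by omega), pvTakeGet _ _ _ (by omega)]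
    · rw [List.getElem?_eq_none (by simp [List.length_take]; omega),
        List.getElem?_eq_none (by simp [List.length_take]; omega)]

theorem pvJoin_nil_cons (x : List Char) (xs : List (List Char)) :
    PySem.Chars.join [] (x :: xs) = x ++ PySem.Chars.join [] xs := by
  cases xs with
  | nil => simp [PySem.Chars.join_singleton, PySem.Chars.join_nil]
  | cons y ys => rw [PySem.Chars.join_cons_cons]; simp

theorem pvJoin_nil_append (xs ys : List (List Char)) :
    PySem.Chars.join [] (xs ++ ys) = PySem.Chars.join [] xs ++ PySem.Chars.join [] ys := by
  induction xs with
  | nil => simp [PySem.Chars.join_nil]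
  | cons x xs ih => simp [pvJoin_nil_cons, ih, List.append_assoc]

-- ---------- find characterization ----------

theorem pvFind_eq (s sub : List Char) (n : Nat) (h1 : sub <+: s.drop n)
    (h2 : ∀ i < n, ¬ sub <+: s.drop i) : PySem.Chars.find s sub = n := by
  have hinf : sub <:+: s := by
    have hex : ∃ j, sub <+: s.drop j := ⟨n, h1⟩
    rw [PySem.Chars.exists_prefix_drop_iff_isIn, PySem.Chars.isIn_iff_infix] at hex
    exact hex
  have h0 : 0 ≤ PySem.Chars.find s sub := (PySem.Chars.find_nonneg_iff s sub).mpr hinf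
  obtain ⟨hp, hmin⟩ := PySem.Chars.find_spec h0
  rcases lt_trichotomy (PySem.Chars.find s sub).toNat n with h | h | h
  · exact absurd hp (h2 _ h)
  · omega
  · exact absurd h1 (hmin n h)

theorem pvFind_zero_of_prefix (s sub : List Char) (h : sub <+: s) :
    PySem.Chars.find s sub = 0 := by
  apply pvFind_eq s sub 0 (by simpa using h)
  intro i hi
  omega

theorem pvFind_cons_not_prefix (c : Char) (rest sub : List Char) (h : ¬ sub <+: (c :: rest)) :
    PySem.Chars.find (c :: rest) sub =
      if PySem.Chars.find rest sub = -1 then -1 else PySem.Chars.find rest sub + 1 := by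
  by_cases hr : PySem.Chars.find rest sub = -1
  · simp only [hr, reduceIte]
    rw [PySem.Chars.find_eq_neg_one_iff] at hr ⊢
    intro hinf
    rcases List.infix_cons_iff.mp hinf with hp | hi
    · exact h hp
    · exact hr hi
  · simp only [hr, reduceIte]
    have h0 : 0 ≤ PySem.Chars.find rest sub := by
      have := PySem.Chars.neg_one_le_find rest sub; omega
    obtain ⟨hp, hmin⟩ := PySem.Chars.find_spec h0
    have := pvFind_eq (c :: rest) sub ((PySem.Chars.find rest sub).toNat + 1)
      (by rw [List.drop_succ_cons]; exact hp)
      (by intro i hi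
          cases i with
          | zero => simpa using h
          | succ j => rw [List.drop_succ_cons]; exact hmin j (by omega))
    omega

theorem pvFind_append (pre rest sub : List Char)
    (h : ∀ p < pre.length, ¬ sub <+: (pre ++ rest).drop p) :
    PySem.Chars.find (pre ++ rest) sub =
      if PySem.Chars.find rest sub = -1 then -1 else (pre.length : Int) + PySem.Chars.find rest sub := by
  by_cases hr : PySem.Chars.find rest sub = -1
  · simp only [hr, reduceIte]
    rw [PySem.Chars.find_eq_neg_one_iff] at hr ⊢
    intro hinf
    have hex : ∃ j, sub <+: (pre ++ rest).drop j := by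
      rw [PySem.Chars.exists_prefix_drop_iff_isIn, PySem.Chars.isIn_iff_infix]
      exact hinf
    obtain ⟨j, hj⟩ := hex
    by_cases hjl : j < pre.length
    · exact h j hjl hj
    · apply hr
      rw [show j = pre.length + (j - pre.length) by omega, pvDropAppend] at hj
      have hex2 : ∃ j', sub <+: rest.drop j' := ⟨j - pre.length, hj⟩
      rw [PySem.Chars.exists_prefix_drop_iff_isIn, PySem.Chars.isIn_iff_infix] at hex2
      exact hex2
  · simp only [hr, reduceIte]
    have h0 : 0 ≤ PySem.Chars.find rest sub := by
      have := PySem.Chars.neg_one_le_find rest sub; omega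
    obtain ⟨hp, hmin⟩ := PySem.Chars.find_spec h0
    have := pvFind_eq (pre ++ rest) sub (pre.length + (PySem.Chars.find rest sub).toNat)
      (by rw [pvDropAppend]; exact hp)
      (by intro i hi
          by_cases hil : i < pre.length
          · exact h i hil
          · rw [show i = pre.length + (i - pre.length) by omega, pvDropAppend]
            exact hmin (i - pre.length) (by omega))
    omega

-- ---------- splitOn characterization ----------

theorem pvGo_spec : ∀ (fuel : Nat) (l cur : List Char) (acc : List (List Char)),
    l.length ≤ fuel →
    PySem.Chars.splitOn.go pvSep fuel l cur acc =
      (if PySem.Chars.find l pvSep = -1 then acc.reverse ++ [cur.reverse ++ l]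
       else acc.reverse ++ [cur.reverse ++ l.take (PySem.Chars.find l pvSep).toNat] ++
         PySem.Chars.splitOn (l.drop ((PySem.Chars.find l pvSep).toNat + 4)) pvSep) := by
  intro fuel
  induction fuel using Nat.strong_induction_on with
  | _ fuel IH =>
  intro l cur acc hle
  match fuel, l with
  | 0, l =>
    have hl : l = [] := by cases l <;> simp_all
    subst hl
    have hf : PySem.Chars.find ([] : List Char) pvSep = -1 := by decide
    simp [PySem.Chars.splitOn.go, hf]
  | (f+1), [] =>
    have hf : PySem.Chars.find ([] : List Char) pvSep = -1 := by decide
    simp [PySem.Chars.splitOn.go, hf]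
  | (f+1), (c :: rest) =>
    have hlc : (c :: rest).length = rest.length + 1 := by simp
    by_cases hpf : pvSep.isPrefixOf (c :: rest) = true
    · have hpre : pvSep <+: c :: rest := List.isPrefixOf_iff_prefix.mp hpf
      have hlen4 : 4 ≤ (c :: rest).length := by
        have h4 : pvSep.length = 4 := rfl
        have := hpre.length_le
        omega
      have hf0 : PySem.Chars.find (c :: rest) pvSep = 0 :=
        pvFind_zero_of_prefix _ _ hpre
      have hstep : PySem.Chars.splitOn.go pvSep (f+1) (c :: rest) cur acc =
          PySem.Chars.splitOn.go pvSep f ((c :: rest).drop 4) [] (cur.reverse :: acc) := by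
        simp only [PySem.Chars.splitOn.go]
        rw [if_pos hpf]
        rfl
      have hd4 : ((c :: rest).drop 4).length = (c :: rest).length - 4 := by
        simp
      rw [hstep, IH f (by omega) _ _ _ (by omega)]
      have hexp : PySem.Chars.splitOn ((c :: rest).drop 4) pvSep =
          PySem.Chars.splitOn.go pvSep (((c :: rest).drop 4).length + 1) ((c :: rest).drop 4) [] [] := rfl
      conv_rhs => rw [hf0, if_neg (by decide : ¬((0 : Int) = -1))]
      simp only [Int.toNat_zero, List.take_zero, Nat.zero_add, List.append_nil]
      conv_rhs => rw [hexp, IH (((c :: rest).drop 4).length + 1) (by omega) _ _ _ (by omega)]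
      by_cases hf2 : PySem.Chars.find ((c :: rest).drop 4) pvSep = -1
      · rw [if_pos hf2, if_pos hf2]
        simp [List.reverse_cons, List.append_assoc]
      · rw [if_neg hf2, if_neg hf2]
        simp [List.reverse_cons, List.append_assoc]
    · have hnp : ¬ pvSep <+: (c :: rest) := fun hh => hpf (List.isPrefixOf_iff_prefix.mpr hh)
      have hstep : PySem.Chars.splitOn.go pvSep (f+1) (c :: rest) cur acc =
          PySem.Chars.splitOn.go pvSep f rest (c :: cur) acc := by
        simp only [PySem.Chars.splitOn.go]
        rw [if_neg hpf]
      rw [hstep, IH f (by omega) _ _ _ (by omega)]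
      have hfc := pvFind_cons_not_prefix c rest pvSep hnp
      by_cases hr : PySem.Chars.find rest pvSep = -1
      · have hfl : PySem.Chars.find (c :: rest) pvSep = -1 := by rw [hfc]; simp [hr]
        simp [hr, hfl, List.reverse_cons, List.append_assoc]
      · have h0 : 0 ≤ PySem.Chars.find rest pvSep := by
          have := PySem.Chars.neg_one_le_find rest pvSep; omega
        have hfl : PySem.Chars.find (c :: rest) pvSep = PySem.Chars.find rest pvSep + 1 := by
          rw [hfc]; simp [hr]
        rw [if_neg hr, if_neg (by rw [hfl]; omega)]
        have ht1 : (PySem.Chars.find (c :: rest) pvSep).toNat = (PySem.Chars.find rest pvSep).toNat + 1 := by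
          rw [hfl]; omega
        rw [ht1, List.take_succ_cons, show (PySem.Chars.find rest pvSep).toNat + 1 + 4 =
          ((PySem.Chars.find rest pvSep).toNat + 4) + 1 by omega, List.drop_succ_cons]
        simp [List.reverse_cons, List.append_assoc]

theorem pvSplitOn_neg (v : List Char) (h : PySem.Chars.find v pvSep = -1) :
    PySem.Chars.splitOn v pvSep = [v] := by
  have hdef : PySem.Chars.splitOn v pvSep = PySem.Chars.splitOn.go pvSep (v.length + 1) v [] [] := rfl
  rw [hdef, pvGo_spec (v.length + 1) v [] [] (by omega)]
  simp [h]

theorem pvSplitOn_pos (v : List Char) (h : PySem.Chars.find v pvSep ≠ -1) :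
    PySem.Chars.splitOn v pvSep =
      v.take (PySem.Chars.find v pvSep).toNat ::
        PySem.Chars.splitOn (v.drop ((PySem.Chars.find v pvSep).toNat + 4)) pvSep := by
  have hdef : PySem.Chars.splitOn v pvSep = PySem.Chars.splitOn.go pvSep (v.length + 1) v [] [] := rfl
  rw [hdef, pvGo_spec (v.length + 1) v [] [] (by omega)]
  simp [h]

theorem pvSplitOn_ne_nil (v : List Char) : PySem.Chars.splitOn v pvSep ≠ [] := by
  by_cases h : PySem.Chars.find v pvSep = -1
  · rw [pvSplitOn_neg v h]; simp
  · rw [pvSplitOn_pos v h]; simp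

theorem pvFind_len4 (v : List Char) (h : PySem.Chars.find v pvSep ≠ -1) :
    (PySem.Chars.find v pvSep).toNat + 4 ≤ v.length := by
  have h0 : 0 ≤ PySem.Chars.find v pvSep := by
    have := PySem.Chars.neg_one_le_find v pvSep; omega
  obtain ⟨hp, _⟩ := PySem.Chars.find_spec h0
  have hll := hp.length_le
  rw [List.length_drop] at hll
  have h4 : pvSep.length = 4 := rfl
  omega

theorem pvSplitOn_len_aux : ∀ (N : Nat) (v : List Char), v.length ≤ N →
    (PySem.Chars.splitOn v pvSep).length ≤ v.length + 1 := by
  intro N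
  induction N with
  | zero =>
    intro v hv
    have hnil : v = [] := by cases v <;> simp_all
    subst hnil
    rw [pvSplitOn_neg [] (by decide)]
    simp
  | succ N ihN =>
    intro v hv
    by_cases hf : PySem.Chars.find v pvSep = -1
    · rw [pvSplitOn_neg v hf]; simp
    · have hk4 := pvFind_len4 v hf
      rw [pvSplitOn_pos v hf]
      have := ihN (v.drop ((PySem.Chars.find v pvSep).toNat + 4)) (by simp; omega)
      simp only [List.length_cons, List.length_drop] at this ⊢
      omega

theorem pvSplitOn_len (v : List Char) : (PySem.Chars.splitOn v pvSep).length ≤ v.length + 1 :=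
  pvSplitOn_len_aux v.length v (le_refl _)

theorem pvSplitOn_append (pre rest : List Char)
    (h : ∀ p < pre.length, ¬ pvSep <+: (pre ++ rest).drop p) :
    PySem.Chars.splitOn (pre ++ rest) pvSep =
      (pre ++ (PySem.Chars.splitOn rest pvSep).headD []) :: (PySem.Chars.splitOn rest pvSep).tail := by
  have hfa := pvFind_append pre rest pvSep h
  by_cases hr : PySem.Chars.find rest pvSep = -1
  · rw [pvSplitOn_neg rest hr]
    rw [pvSplitOn_neg (pre ++ rest) (by rw [hfa]; simp [hr])]
    simp
  · have h0 : 0 ≤ PySem.Chars.find rest pvSep := by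
      have := PySem.Chars.neg_one_le_find rest pvSep; omega
    have hfl : PySem.Chars.find (pre ++ rest) pvSep =
        (pre.length : Int) + PySem.Chars.find rest pvSep := by rw [hfa]; simp [hr]
    have ht : (PySem.Chars.find (pre ++ rest) pvSep).toNat =
        pre.length + (PySem.Chars.find rest pvSep).toNat := by rw [hfl]; omega
    rw [pvSplitOn_pos (pre ++ rest) (by rw [hfl]; omega), pvSplitOn_pos rest hr]
    rw [ht, pvTakeAppend, show pre.length + (PySem.Chars.find rest pvSep).toNat + 4 =
      pre.length + ((PySem.Chars.find rest pvSep).toNat + 4) by omega, pvDropAppend]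
    simp

-- ---------- the inserted text contains no '%' ----------

theorem pvDigitChar_ne_pct : ∀ (n : Nat), Nat.digitChar n ≠ '%'
  | 0 => by decide
  | 1 => by decide
  | 2 => by decide
  | 3 => by decide
  | 4 => by decide
  | 5 => by decide
  | 6 => by decide
  | 7 => by decide
  | 8 => by decide
  | 9 => by decide
  | 10 => by decide
  | 11 => by decide
  | 12 => by decide
  | 13 => by decide
  | 14 => by decide
  | 15 => by decide
  | (n+16) => by
    have h : Nat.digitChar (n+16) = '*' := by
      unfold Nat.digitChar
      rw [if_neg (by omega), if_neg (by omega), if_neg (by omega), if_neg (by omega),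
        if_neg (by omega), if_neg (by omega), if_neg (by omega), if_neg (by omega),
        if_neg (by omega), if_neg (by omega), if_neg (by omega), if_neg (by omega),
        if_neg (by omega), if_neg (by omega), if_neg (by omega), if_neg (by omega)]
    rw [h]
    decide

theorem pvToDigitsCore_pct : ∀ (fuel n : Nat) (ds : List Char),
    '%' ∉ ds → '%' ∉ Nat.toDigitsCore 10 fuel n ds := by
  intro fuel
  induction fuel with
  | zero => intro n ds h; simpa [Nat.toDigitsCore] using h
  | succ f ih =>
    intro n ds h
    simp only [Nat.toDigitsCore]
    split
    · intro hmem
      rcases List.mem_cons.mp hmem with h1 | h1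
      · exact pvDigitChar_ne_pct _ h1.symm
      · exact h h1
    · apply ih
      intro hmem
      rcases List.mem_cons.mp hmem with h1 | h1
      · exact pvDigitChar_ne_pct _ h1.symm
      · exact h h1

theorem pvToChars_pct (j : Int) : '%' ∉ PySem.Int.toChars j := by
  unfold PySem.Int.toChars
  split_ifs
  · intro hmem
    rcases List.mem_cons.mp hmem with h1 | h1
    · exact absurd h1 (by decide)
    · exact pvToDigitsCore_pct _ _ [] (by simp) (by simpa [Nat.toDigits] using h1)
  · intro hmem
    exact pvToDigitsCore_pct _ _ [] (by simp) (by simpa [Nat.toDigits] using hmem)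

-- ---------- no "%lld" occurrence starts inside the spliced-in prefix ----------

theorem pvNoSpan (v nm : List Char) (k : Nat)
    (hf : PySem.Chars.find v pvSep = (k : Int)) (hnm : '%' ∉ nm) :
    ∀ p < (v.take k ++ ('\\' :: '(' :: (nm ++ [')']))).length,
      ¬ pvSep <+: ((v.take k ++ ('\\' :: '(' :: (nm ++ [')']))) ++ v.drop (k + 4)).drop p := by
  have h0 : 0 ≤ PySem.Chars.find v pvSep := by rw [hf]; omega
  obtain ⟨hp4, hmin⟩ := PySem.Chars.find_spec h0
  rw [hf] at hp4 hmin
  rw [show ((k : Int)).toNat = k from by omega] at hp4 hmin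
  have hkle : k + 4 ≤ v.length := by
    have hll := hp4.length_le
    rw [List.length_drop] at hll
    have h4 : pvSep.length = 4 := rfl
    omega
  have htk : (v.take k).length = k := by rw [List.length_take]; omega
  intro p hp hpref
  have hw : ∀ (j : Nat) (hj : j < pvSep.length),
      ((v.take k ++ ('\\' :: '(' :: (nm ++ [')']))) ++ v.drop (k + 4))[p + j]? = some (pvSep[j]'hj) := by
    intro j hj
    have := (pvPrefix_iff pvSep _).mp hpref j hj
    rwa [pvDropGet] at this
  have hsl : pvSep.length = 4 := rfl
  rcases Nat.lt_or_ge p k with hpk | hpk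
  · rcases Nat.lt_or_ge k (p + 4) with hlt4 | hle4
    swap
    · -- entirely inside v.take k: an occurrence of pvSep in v before k — contradicts minimality
      apply hmin p hpk
      rw [pvPrefix_iff]
      intro j hj
      rw [pvDropGet]
      have hjk : p + j < k := by rw [hsl] at hj; omega
      have := hw j hj
      rw [List.getElem?_append_left (by rw [List.length_append, htk]; omega),
        List.getElem?_append_left (by rw [htk]; omega), pvTakeGet _ _ _ hjk] at this
      exact this
    · -- the window crosses the '\\' at index k
      have hj4 : k - p < pvSep.length := by rw [hsl]; omega
      have h1 := hw (k - p) hj4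
      rw [show p + (k - p) = k by omega] at h1
      rw [List.getElem?_append_left (by simp [List.length_append, List.length_cons, htk]),
        List.getElem?_append_right (le_of_eq htk)] at h1
      rw [htk, Nat.sub_self] at h1
      simp at h1
      have hm : pvSep[k - p]'hj4 ∈ pvSep := List.getElem_mem hj4
      rw [← h1] at hm
      exact absurd hm (by decide)
  · -- starts inside the inserted text: its first char would have to be '%'
    have h1 := hw 0 (by rw [hsl]; omega)
    simp only [Nat.add_zero] at h1
    rw [List.getElem?_append_left hp] at h1
    rw [List.getElem?_append_right (by rw [htk]; omega)] at h1
    have hmem : pvSep[0]'(by decide) ∈ ('\\' :: '(' :: (nm ++ [')'])) := List.mem_of_getElem? h1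
    have hmem' : '%' ∈ ('\\' :: '(' :: (nm ++ [')'])) := hmem
    rcases List.mem_cons.mp hmem' with h2 | h2
    · exact absurd h2 (by decide)
    · rcases List.mem_cons.mp h2 with h3 | h3
      · exact absurd h3 (by decide)
      · rcases List.mem_append.mp h3 with h4 | h4
        · exact hnm h4
        · exact absurd h4 (by decide)

-- ---------- proof-only spec of A's loop result ----------

def pvName (j : Int) : List Char := ['a', 'r', 'g'] ++ PySem.Int.toChars j

def pvNames : Int → Nat → List (List Char)
  | _, 0 => []
  | i, m+1 => pvName (i+1) :: pvNames (i+1) m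

def pvGlue : Int → List (List Char) → List Char
  | _, [] => []
  | i, p :: ps => ['\\', '('] ++ pvName (i+1) ++ [')'] ++ p ++ pvGlue (i+1) ps

theorem pvNames_length (m : Nat) : ∀ i : Int, (pvNames i m).length = m := by
  induction m with
  | zero => intro i; rfl
  | succ m ih => intro i; simp [pvNames, ih]

theorem pvLoop_spec : ∀ (fuel : Nat) (value : List Char) (i : Int) (args : List (List Char)),
    (PySem.Chars.splitOn value pvSep).length ≤ fuel + 1 →
    pvLoopA fuel value i args =
      (args ++ pvNames i ((PySem.Chars.splitOn value pvSep).length - 1),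
       (PySem.Chars.splitOn value pvSep).headD [] ++ pvGlue i (PySem.Chars.splitOn value pvSep).tail) := by
  intro fuel
  induction fuel with
  | zero =>
    intro value i args hle
    by_cases hf : PySem.Chars.find value pvSep = -1
    · rw [pvSplitOn_neg value hf]; simp [pvLoopA, pvNames, pvGlue]
    · exfalso
      rw [pvSplitOn_pos value hf] at hle
      have h1 := pvSplitOn_ne_nil (value.drop ((PySem.Chars.find value pvSep).toNat + 4))
      cases h' : PySem.Chars.splitOn (value.drop ((PySem.Chars.find value pvSep).toNat + 4)) pvSep with
      | nil => exact h1 h'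
      | cons a as => rw [h'] at hle; simp at hle
  | succ fuel ih =>
    intro value i args hle
    by_cases hf : PySem.Chars.find value pvSep = -1
    · rw [pvSplitOn_neg value hf]
      simp [pvLoopA, hf, pvNames, pvGlue]
    · have h0 : 0 ≤ PySem.Chars.find value pvSep := by
        have := PySem.Chars.neg_one_le_find value pvSep; omega
      have hfk : PySem.Chars.find value pvSep = ((PySem.Chars.find value pvSep).toNat : Int) := by omega
      set k := (PySem.Chars.find value pvSep).toNat with hk
      have hk4 := pvFind_len4 value hf
      have hstep : pvLoopA (fuel+1) value i args = pvLoopA fuel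
          (PySem.Chars.slice value none (some (PySem.Chars.find value pvSep)) ++ ['\\', '('] ++
            (['a', 'r', 'g'] ++ PySem.Int.toChars (i+1)) ++ [')'] ++
            PySem.Chars.slice value (some (PySem.Chars.find value pvSep + 4)) none)
          (i+1) (args ++ [['a', 'r', 'g'] ++ PySem.Int.toChars (i+1)]) := by
        simp [pvLoopA, hf]
      have hs1 : PySem.Chars.slice value none (some (PySem.Chars.find value pvSep)) = value.take k := by
        rw [PySem.Chars.slice_eq_listSlice, PySem.List.slice_to value h0]
      have hs2 : PySem.Chars.slice value (some (PySem.Chars.find value pvSep + 4)) none = value.drop (k+4) := by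
        rw [PySem.Chars.slice_eq_listSlice, PySem.List.slice_from value (by omega)]
        congr 1
        omega
      rw [hstep, hs1, hs2]
      have hshape : value.take k ++ (['\\', '('] : List Char) ++
            ((['a', 'r', 'g'] : List Char) ++ PySem.Int.toChars (i+1)) ++ ([')'] : List Char) ++
            value.drop (k+4)
          = (value.take k ++ ('\\' :: '(' :: ((['a', 'r', 'g'] ++ PySem.Int.toChars (i+1)) ++ [')'])))
            ++ value.drop (k+4) := by
        simp [List.append_assoc]
      rw [hshape]
      have hnm : '%' ∉ (['a', 'r', 'g'] ++ PySem.Int.toChars (i+1)) := by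
        intro hmem
        rcases List.mem_append.mp hmem with h1 | h1
        · exact absurd h1 (by decide)
        · exact pvToChars_pct (i+1) h1
      have hnsp := pvNoSpan value (['a', 'r', 'g'] ++ PySem.Int.toChars (i+1)) k hfk hnm
      have hsepapp := pvSplitOn_append
        (value.take k ++ ('\\' :: '(' :: ((['a', 'r', 'g'] ++ PySem.Int.toChars (i+1)) ++ [')'])))
        (value.drop (k+4)) hnsp
      have hvpos := pvSplitOn_pos value hf
      obtain ⟨s0, ss, hS⟩ : ∃ s0 ss,
          PySem.Chars.splitOn (value.drop (k+4)) pvSep = s0 :: ss := by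
        cases h' : PySem.Chars.splitOn (value.drop (k+4)) pvSep with
        | nil => exact absurd h' (pvSplitOn_ne_nil _)
        | cons a as => exact ⟨a, as, rfl⟩
      rw [hS] at hsepapp
      rw [hS] at hvpos
      rw [ih _ (i+1) _ (by rw [hsepapp]; rw [hvpos] at hle; simp at hle ⊢; omega)]
      rw [hsepapp, hvpos]
      simp only [List.length_cons, List.headD_cons, List.tail_cons, Nat.add_sub_cancel]
      have hnames : args ++ [['a', 'r', 'g'] ++ PySem.Int.toChars (i+1)] ++ pvNames (i+1) ss.length
          = args ++ pvNames i (ss.length + 1) := by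
        rw [show pvNames i (ss.length + 1) = pvName (i+1) :: pvNames (i+1) ss.length from rfl]
        simp [pvName, List.append_assoc]
      have hglue : (value.take k ++ ('\\' :: '(' :: ((['a', 'r', 'g'] ++ PySem.Int.toChars (i+1)) ++ [')'])))
            ++ s0 ++ pvGlue (i+1) ss
          = value.take k ++ pvGlue i (s0 :: ss) := by
        rw [show pvGlue i (s0 :: ss) =
          ['\\', '('] ++ pvName (i+1) ++ [')'] ++ s0 ++ pvGlue (i+1) ss from rfl]
        simp [pvName, List.append_assoc]
      rw [hnames, hglue]

-- ---------- title / keyName ----------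

theorem pvTitle_fold (w : List Char) : ∀ (acc : List Char) (b : Bool),
    (w.foldl (fun (acc : List Char × Bool) c =>
      if PySem.Chars.isalpha c then
        (acc.1 ++ [if acc.2 then PySem.Chars.lowerChar c else PySem.Chars.upperChar c], true)
      else (acc.1 ++ [c], false)) (acc, b)).1 = acc ++ pvTitleB b w := by
  induction w with
  | nil => intro acc b; simp [pvTitleB]
  | cons c cs ih =>
    intro acc b
    by_cases h : PySem.Chars.isalpha c = true
    · simp [h, pvTitleB, ih]
    · simp [h, pvTitleB, ih]

theorem pvTitle_eq (w : List Char) : pvTitleA w = pvTitleB false w := by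
  unfold pvTitleA
  simpa using pvTitle_fold w [] false

theorem pvKeyName_eq (key : List Char) : pvKeyNameA key = pvKeyNameB key := by
  cases h : PySem.Chars.split₀ key with
  | nil => simp [pvKeyNameA, pvKeyNameB, h]
  | cons w ws =>
    simp only [pvKeyNameA, pvKeyNameB, h]
    rw [List.map_congr_left (fun a _ => pvTitle_eq a)]

-- ---------- B's range/zip form equals the loop spec ----------

theorem pvRange_self (a : Int) : PySem.List.pyRange a a 1 = [] := by
  simp [PySem.List.pyRange]

theorem pvRange_names : ∀ (m : Nat) (i : Int),
    (PySem.List.pyRange (i+1) (i+1+(m : Int)) 1).map (fun j => ['a', 'r', 'g'] ++ PySem.Int.toChars j)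
      = pvNames i m := by
  intro m
  induction m with
  | zero =>
    intro i
    rw [show (i+1+((0 : Nat) : Int)) = i+1 by simp, pvRange_self]
    rfl
  | succ m ih =>
    intro i
    rw [show i+1+(((m+1 : Nat)) : Int) = (i+1)+1+(m : Int) by push_cast; ring]
    rw [PySem.List.pyRange_one_cons (by omega)]
    simp only [List.map_cons]
    rw [ih (i+1)]
    rfl

theorem pvRange_names0 (m : Nat) :
    (PySem.List.pyRange 1 ((m : Int)+1) 1).map (fun j => ['a', 'r', 'g'] ++ PySem.Int.toChars j)
      = pvNames 0 m := by
  have h := pvRange_names m 0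
  rw [show (0 : Int)+1+(m : Int) = (m : Int)+1 by ring, show (0 : Int)+1 = 1 by norm_num] at h
  exact h

theorem pvZip_glue : ∀ (ps : List (List Char)) (i : Int),
    PySem.Chars.join [] (((pvNames i ps.length).zip ps).map
      (fun ap => ['\\', '('] ++ ap.1 ++ [')'] ++ ap.2)) = pvGlue i ps := by
  intro ps
  induction ps with
  | nil => intro i; simp [pvNames, pvGlue, PySem.Chars.join_nil]
  | cons p ps ih =>
    intro i
    simp only [List.length_cons]
    rw [show pvNames i (ps.length+1) = pvName (i+1) :: pvNames (i+1) ps.length from rfl]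
    simp only [List.zip_cons_cons, List.map_cons]
    rw [pvJoin_nil_cons, ih (i+1)]
    simp [pvGlue, List.append_assoc]

-- ---------- per-entry equality and the final fold ----------

theorem pvEntry_eq (key value : List Char) : pvEntryA key value = pvEntryB key value := by
  have hsep : ("%lld".toList : List Char) = pvSep := by decide
  have hloop := pvLoop_spec value.length value 0 [] (pvSplitOn_len value)
  have htail : (PySem.Chars.splitOn value pvSep).tail.length =
      (PySem.Chars.splitOn value pvSep).length - 1 := by
    cases h' : PySem.Chars.splitOn value pvSep with
    | nil => exact absurd h' (pvSplitOn_ne_nil value)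
    | cons a as => simp
  simp only [pvEntryA, pvEntryB, hsep]
  rw [hloop]
  simp only [List.nil_append, gt_iff_lt]
  rw [pvNames_length]
  by_cases hpos : 0 < (PySem.Chars.splitOn value pvSep).length - 1
  · rw [if_pos hpos, if_pos hpos]
    rw [pvRange_names0]
    have hz := pvZip_glue ((PySem.Chars.splitOn value pvSep).tail) 0
    rw [htail] at hz
    rw [hz]
  · rw [if_neg hpos, if_neg hpos, pvKeyName_eq]

theorem pvFold_eq_aux : ∀ (l : List (String × Option String)) (accB : List (List Char)),
    l.foldl (fun acc kv =>
      match kv.2 with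
      | none => acc
      | some v => acc ++ pvEntryA kv.1.toList v.toList) (PySem.Chars.join [] accB) =
    PySem.Chars.join [] (l.foldl (fun (acc : List (List Char)) kv =>
      match kv.2 with
      | none => acc
      | some v => acc ++ [pvEntryB kv.1.toList v.toList]) accB) := by
  intro l
  induction l with
  | nil => intro accB; rfl
  | cons kv l ih =>
    intro accB
    cases hv : kv.2 with
    | none => simp only [List.foldl_cons, hv]; exact ih accB
    | some v =>
      simp only [List.foldl_cons, hv]
      have hstep : PySem.Chars.join [] accB ++ pvEntryA kv.1.toList v.toList =
          PySem.Chars.join [] (accB ++ [pvEntryB kv.1.toList v.toList]) := by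
        rw [pvJoin_nil_append, PySem.Chars.join_singleton, pvEntry_eq]
      rw [hstep]
      exact ih (accB ++ [pvEntryB kv.1.toList v.toList])

-- ===== VERDICT (by name: the statement is the Claim_ definition above) =====
theorem generate_swift_class_spec : Claim_equal_generate_swift_class := by
  intro strings _dom _pre
  unfold Spec_generate_swift_class generate_swift_class generate_swift_class_alt
  have h := pvFold_eq_aux strings []
  rw [PySem.Chars.join_nil] at h
  rw [h]
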